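-- pv_equiv track=rewrite | github.com/Sourpat/AutoComply-AI | backend/app/audit/execution_preview.py | _select_primary_ui_impact
-- ===== SOURCE A (Python) =====
-- from typing import Any, Dict, List, Optional
--
-- def _select_primary_ui_impact(impacts: List[str]) -> str:
--     priority = [
--         "blocking_modal",
--         "disabled_action",
--         "badge_warning",
--         "inline_validation",
--         "informational_copy",
--         "none",
--         "unknown",
--     ]
--     for impact in priority:
--         if impact in impacts:
--             return impact
--     return "unknown"
-- ===== SOURCE B (Python) =====
-- def _select_primary_ui_impact(impacts):
--     priority = [
--         "blocking_modal",
--         "disabled_action",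
--         "badge_warning",
--         "inline_validation",
--         "informational_copy",
--         "none",
--         "unknown",
--     ]
--     rank = {p: i for i, p in enumerate(priority)}
--     best = None
--     for impact in impacts:
--         r = rank.get(impact)
--         if r is not None and (best is None or r < best[0]):
--             best = (r, impact)
--     return best[1] if best is not None else "unknown"
-- ===== Notes on version B (the rewrite author's own statement) =====
-- stated objective: alternative
-- what changed: B makes a single pass over the input list, maintaining a minimum-rank accumulator keyed by a precomputed priority->index dict, instead of scanning the fixed priority list with a membership test per priority.
import Mathlib
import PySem

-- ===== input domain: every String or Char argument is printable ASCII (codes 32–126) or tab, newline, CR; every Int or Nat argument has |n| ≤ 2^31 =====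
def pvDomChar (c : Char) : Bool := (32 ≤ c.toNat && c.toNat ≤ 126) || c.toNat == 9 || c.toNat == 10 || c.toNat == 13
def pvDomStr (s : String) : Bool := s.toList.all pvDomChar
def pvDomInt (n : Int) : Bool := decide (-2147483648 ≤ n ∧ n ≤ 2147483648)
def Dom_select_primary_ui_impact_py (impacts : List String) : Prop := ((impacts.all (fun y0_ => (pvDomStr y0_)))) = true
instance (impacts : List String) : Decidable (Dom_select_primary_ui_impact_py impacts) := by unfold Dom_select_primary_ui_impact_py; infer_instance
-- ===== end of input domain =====

-- B replaces A's scan of the fixed priority list (membership test per priority) by a single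
-- pass over the input maintaining a minimum-rank accumulator via a priority->index dict.


-- ===== PORT A =====
def pvPriorityA : List String :=
  ["blocking_modal", "disabled_action", "badge_warning", "inline_validation",
   "informational_copy", "none", "unknown"]

-- the for-loop with early return: first priority contained in impacts
def pvALoop : List String → List String → String
  | [], _ => "unknown"
  | p :: ps, impacts => if impacts.contains p then p else pvALoop ps impacts

def select_primary_ui_impact_py (impacts : List String) : String :=
  pvALoop pvPriorityA impacts

-- ===== PORT B =====
def pvPriorityB : List String :=
  ["blocking_modal", "disabled_action", "badge_warning", "inline_validation",
   "informational_copy", "none", "unknown"]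

-- rank = {p: i for i, p in enumerate(priority)}
def pvRank : PySem.Dict String Int :=
  (PySem.List.enumerate pvPriorityB 0).foldl (fun d p => d.insert p.2 p.1) PySem.Dict.empty

-- loop body: r = rank.get(impact); if r is not None and (best is None or r < best[0]): best = (r, impact)
def pvBStep (best : Option (Int × String)) (impact : String) : Option (Int × String) :=
  match pvRank.get? impact with
  | none => best
  | some r =>
    match best with
    | none => some (r, impact)
    | some (b, s) => if r < b then some (r, impact) else some (b, s)

def select_primary_ui_impact_py_alt (impacts : List String) : String :=
  match impacts.foldl pvBStep none with
  | some (_, s) => s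
  | none => "unknown"

-- ===== PRECONDITION & SPEC =====
def Spec_select_primary_ui_impact_py (impacts : List String) (out : String) : Prop := out = select_primary_ui_impact_py_alt impacts
instance (impacts : List String) (out : String) : Decidable (Spec_select_primary_ui_impact_py impacts out) := by unfold Spec_select_primary_ui_impact_py; infer_instance

-- ===== CLAIM (what is proved, stated in full; the proofs are below) =====
def Claim_equal_select_primary_ui_impact_py : Prop := ∀ (impacts : List String), Dom_select_primary_ui_impact_py impacts → Spec_select_primary_ui_impact_py impacts (select_primary_ui_impact_py impacts)

-- ===== LEMMAS AND PROOFS =====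

-- the rank dict is the literal 7-entry dict
lemma pvRank_eq : pvRank = PySem.Dict.mk
    [("blocking_modal", 0), ("disabled_action", 1), ("badge_warning", 2),
     ("inline_validation", 3), ("informational_copy", 4), ("none", 5), ("unknown", 6)] := by
  decide

-- a successful rank lookup identifies both the string and its index
lemma pvRank_inj (x : String) (k : Int) (h : pvRank.get? x = some k) :
    (k = 0 ∧ x = "blocking_modal") ∨ (k = 1 ∧ x = "disabled_action") ∨
    (k = 2 ∧ x = "badge_warning") ∨ (k = 3 ∧ x = "inline_validation") ∨
    (k = 4 ∧ x = "informational_copy") ∨ (k = 5 ∧ x = "none") ∨ (k = 6 ∧ x = "unknown") := by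
  rw [pvRank_eq] at h
  simp only [PySem.Dict.get?_mk_cons] at h
  split_ifs at h with h0 h1 h2 h3 h4 h5 h6
  · injection h with h; exact Or.inl ⟨h.symm, (eq_of_beq h0).symm⟩
  · injection h with h; exact Or.inr (Or.inl ⟨h.symm, (eq_of_beq h1).symm⟩)
  · injection h with h; exact Or.inr (Or.inr (Or.inl ⟨h.symm, (eq_of_beq h2).symm⟩))
  · injection h with h; exact Or.inr (Or.inr (Or.inr (Or.inl ⟨h.symm, (eq_of_beq h3).symm⟩)))
  · injection h with h; exact Or.inr (Or.inr (Or.inr (Or.inr (Or.inl ⟨h.symm, (eq_of_beq h4).symm⟩))))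
  · injection h with h; exact Or.inr (Or.inr (Or.inr (Or.inr (Or.inr (Or.inl ⟨h.symm, (eq_of_beq h5).symm⟩)))))
  · injection h with h; exact Or.inr (Or.inr (Or.inr (Or.inr (Or.inr (Or.inr ⟨h.symm, (eq_of_beq h6).symm⟩)))))
  · exact absurd h (by simp [PySem.Dict.get?])

-- the B loop, characterised: a `none` result means no input string has a rank
lemma pvBLoop_none : ∀ (xs : List String) (acc : Option (Int × String)),
    xs.foldl pvBStep acc = none → acc = none ∧ ∀ x ∈ xs, pvRank.get? x = none := by
  intro xs
  induction xs with
  | nil => intro acc h; simpa using h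
  | cons x xs ih =>
    intro acc h
    simp only [List.foldl_cons] at h
    rcases hr : pvRank.get? x with _ | r
    · have hstep : pvBStep acc x = acc := by unfold pvBStep; rw [hr]
      rw [hstep] at h
      obtain ⟨h1, h2⟩ := ih _ h
      refine ⟨h1, ?_⟩
      intro y hy; rw [List.mem_cons] at hy
      rcases hy with rfl | hy
      · exact hr
      · exact h2 y hy
    · have h1 := (ih _ h).1
      unfold pvBStep at h1; rw [hr] at h1
      rcases acc with _ | ⟨b, s⟩
      · simp at h1
      · dsimp only at h1; split at h1 <;> simp at h1

-- a `some` result carries a valid rank, is minimal, and comes from the accumulator or the list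
lemma pvBLoop_some : ∀ (xs : List String) (acc : Option (Int × String))
    (hwf : ∀ j t, acc = some (j, t) → pvRank.get? t = some j) (k : Int) (s : String),
    xs.foldl pvBStep acc = some (k, s) →
    pvRank.get? s = some k ∧
    (∀ j t, acc = some (j, t) → k ≤ j) ∧
    (∀ x ∈ xs, ∀ j, pvRank.get? x = some j → k ≤ j) ∧
    (acc = some (k, s) ∨ s ∈ xs) := by
  intro xs
  induction xs with
  | nil =>
    intro acc hwf k s h
    simp only [List.foldl_nil] at h
    refine ⟨hwf k s h, ?_, by simp, Or.inl h⟩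
    intro j t hj
    rw [h] at hj; injection hj with hj; injection hj with e1 e2; omega
  | cons x xs ih =>
    intro acc hwf k s h
    simp only [List.foldl_cons] at h
    rcases hr : pvRank.get? x with _ | r
    · -- x has no rank: accumulator unchanged
      have hstep : pvBStep acc x = acc := by unfold pvBStep; rw [hr]
      rw [hstep] at h
      obtain ⟨g1, g2, g3, g4⟩ := ih acc hwf k s h
      refine ⟨g1, g2, ?_, ?_⟩
      · intro y hy j hj
        rw [List.mem_cons] at hy
        rcases hy with rfl | hy
        · rw [hr] at hj; cases hj
        · exact g3 y hy j hj
      · rcases g4 with g4 | g4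
        · exact Or.inl g4
        · exact Or.inr (List.mem_cons_of_mem _ g4)
    · -- x has rank r
      rcases hacc : acc with _ | ⟨b, t⟩
      · have hstep : pvBStep none x = some (r, x) := by unfold pvBStep; rw [hr]
        rw [hacc, hstep] at h
        have hwf' : ∀ (j : Int) (t' : String), (some (r, x) : Option (Int × String)) = some (j, t') → pvRank.get? t' = some j := by
          intro j t' hj
          injection hj with hj; injection hj with e1 e2
          rw [← e1, ← e2]; exact hr
        obtain ⟨g1, g2, g3, g4⟩ := ih (some (r, x)) hwf' k s h
        have hkr : k ≤ r := g2 r x rfl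
        refine ⟨g1, by simp, ?_, ?_⟩
        · intro y hy j hj
          rw [List.mem_cons] at hy
          rcases hy with rfl | hy
          · rw [hr] at hj; injection hj with hj; omega
          · exact g3 y hy j hj
        · rcases g4 with g4 | g4
          · injection g4 with g4; injection g4 with e1 e2
            exact Or.inr (by rw [← e2]; exact List.mem_cons_self ..)
          · exact Or.inr (List.mem_cons_of_mem _ g4)
      · have hbt : pvRank.get? t = some b := hwf b t hacc
        by_cases hlt : r < b
        · have hstep : pvBStep (some (b, t)) x = some (r, x) := by
            unfold pvBStep; rw [hr]; simp [hlt]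
          rw [hacc, hstep] at h
          have hwf' : ∀ (j : Int) (t' : String), (some (r, x) : Option (Int × String)) = some (j, t') → pvRank.get? t' = some j := by
            intro j t' hj
            injection hj with hj; injection hj with e1 e2
            rw [← e1, ← e2]; exact hr
          obtain ⟨g1, g2, g3, g4⟩ := ih (some (r, x)) hwf' k s h
          have hkr : k ≤ r := g2 r x rfl
          refine ⟨g1, ?_, ?_, ?_⟩
          · intro j t' hj
            injection hj with hj; injection hj with e1 e2; omega
          · intro y hy j hj
            rw [List.mem_cons] at hy
            rcases hy with rfl | hy
            · rw [hr] at hj; injection hj with hj; omega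
            · exact g3 y hy j hj
          · rcases g4 with g4 | g4
            · injection g4 with g4; injection g4 with e1 e2
              exact Or.inr (by rw [← e2]; exact List.mem_cons_self ..)
            · exact Or.inr (List.mem_cons_of_mem _ g4)
        · have hstep : pvBStep (some (b, t)) x = some (b, t) := by
            unfold pvBStep; rw [hr]; simp [hlt]
          rw [hacc, hstep] at h
          have hwf' : ∀ (j : Int) (t' : String), (some (b, t) : Option (Int × String)) = some (j, t') → pvRank.get? t' = some j := by
            intro j t' hj
            injection hj with hj; injection hj with e1 e2
            rw [← e1, ← e2]; exact hbt
          obtain ⟨g1, g2, g3, g4⟩ := ih (some (b, t)) hwf' k s h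
          have hkb : k ≤ b := g2 b t rfl
          refine ⟨g1, ?_, ?_, ?_⟩
          · intro j t' hj
            injection hj with hj; injection hj with e1 e2; omega
          · intro y hy j hj
            rw [List.mem_cons] at hy
            rcases hy with rfl | hy
            · rw [hr] at hj; injection hj with hj; omega
            · exact g3 y hy j hj
          · rcases g4 with g4 | g4
            · exact Or.inl g4
            · exact Or.inr (List.mem_cons_of_mem _ g4)

lemma pv_not_mem_of_none {xs : List String} (p : String)
    (hall : ∀ x ∈ xs, pvRank.get? x = none) (hp : pvRank.get? p ≠ none) :
    p ∉ xs :=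
  fun hc => hp (hall p hc)

lemma pv_not_mem_of_min {xs : List String} (p : String) (j k : Int)
    (hmin : ∀ x ∈ xs, ∀ i, pvRank.get? x = some i → k ≤ i)
    (hp : pvRank.get? p = some j) (hjk : j < k) :
    p ∉ xs :=
  fun hc => absurd (hmin p hc j hp) (by omega)

-- ===== VERDICT (by name: the statement is the Claim_ definition above) =====
theorem select_primary_ui_impact_py_spec : Claim_equal_select_primary_ui_impact_py := by
  intro xs _
  unfold Spec_select_primary_ui_impact_py select_primary_ui_impact_py select_primary_ui_impact_py_alt
  rcases h : xs.foldl pvBStep none with _ | ⟨k, s⟩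
  · obtain ⟨-, hall⟩ := pvBLoop_none xs none h
    have c0 := pv_not_mem_of_none "blocking_modal" hall (by decide)
    have c1 := pv_not_mem_of_none "disabled_action" hall (by decide)
    have c2 := pv_not_mem_of_none "badge_warning" hall (by decide)
    have c3 := pv_not_mem_of_none "inline_validation" hall (by decide)
    have c4 := pv_not_mem_of_none "informational_copy" hall (by decide)
    have c5 := pv_not_mem_of_none "none" hall (by decide)
    have c6 := pv_not_mem_of_none "unknown" hall (by decide)
    simp [pvPriorityA, pvALoop, c0, c1, c2, c3, c4, c5, c6]
  · obtain ⟨hrs, -, hmin, hmem⟩ := pvBLoop_some xs none (by simp) k s h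
    have hsmem : s ∈ xs := by
      rcases hmem with hm | hm
      · exact absurd hm (by simp)
      · exact hm
    rcases pvRank_inj s k hrs with ⟨hk, hs⟩ | ⟨hk, hs⟩ | ⟨hk, hs⟩ | ⟨hk, hs⟩ | ⟨hk, hs⟩ | ⟨hk, hs⟩ | ⟨hk, hs⟩ <;>
      subst hk <;> subst hs <;>
      [skip;
       have c0 := pv_not_mem_of_min "blocking_modal" 0 1 hmin (by decide) (by decide);
       (have c0 := pv_not_mem_of_min "blocking_modal" 0 2 hmin (by decide) (by decide);
        have c1 := pv_not_mem_of_min "disabled_action" 1 2 hmin (by decide) (by decide));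
       (have c0 := pv_not_mem_of_min "blocking_modal" 0 3 hmin (by decide) (by decide);
        have c1 := pv_not_mem_of_min "disabled_action" 1 3 hmin (by decide) (by decide);
        have c2 := pv_not_mem_of_min "badge_warning" 2 3 hmin (by decide) (by decide));
       (have c0 := pv_not_mem_of_min "blocking_modal" 0 4 hmin (by decide) (by decide);
        have c1 := pv_not_mem_of_min "disabled_action" 1 4 hmin (by decide) (by decide);
        have c2 := pv_not_mem_of_min "badge_warning" 2 4 hmin (by decide) (by decide);
        have c3 := pv_not_mem_of_min "inline_validation" 3 4 hmin (by decide) (by decide));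
       (have c0 := pv_not_mem_of_min "blocking_modal" 0 5 hmin (by decide) (by decide);
        have c1 := pv_not_mem_of_min "disabled_action" 1 5 hmin (by decide) (by decide);
        have c2 := pv_not_mem_of_min "badge_warning" 2 5 hmin (by decide) (by decide);
        have c3 := pv_not_mem_of_min "inline_validation" 3 5 hmin (by decide) (by decide);
        have c4 := pv_not_mem_of_min "informational_copy" 4 5 hmin (by decide) (by decide));
       (have c0 := pv_not_mem_of_min "blocking_modal" 0 6 hmin (by decide) (by decide);
        have c1 := pv_not_mem_of_min "disabled_action" 1 6 hmin (by decide) (by decide);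
        have c2 := pv_not_mem_of_min "badge_warning" 2 6 hmin (by decide) (by decide);
        have c3 := pv_not_mem_of_min "inline_validation" 3 6 hmin (by decide) (by decide);
        have c4 := pv_not_mem_of_min "informational_copy" 4 6 hmin (by decide) (by decide);
        have c5 := pv_not_mem_of_min "none" 5 6 hmin (by decide) (by decide))] <;>
    simp_all [pvPriorityA, pvALoop]
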